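-- pv_equiv track=rewrite | github.com/iamdheerajjain/CarePilot | fine_tuned_detectors.py | _get_condition_category
-- ===== SOURCE A (Python) =====
-- def _get_condition_category(condition: str) -> str:
-- 	"""Get category for a condition."""
-- 	categories = {
-- 		"cardiovascular": ["heart attack", "stroke", "angina", "heart failure", "syncope"],
-- 		"respiratory": ["pneumonia", "asthma", "copd", "bronchitis", "respiratory infection"],
-- 		"neurological": ["migraine", "tension headache", "epilepsy", "vertigo", "dementia"],
-- 		"gastrointestinal": ["gastroenteritis", "food poisoning", "appendicitis", "gallstones", "irritable bowel syndrome"],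
-- 		"dermatological": ["allergic reaction", "eczema", "psoriasis", "contact dermatitis"],
-- 		"musculoskeletal": ["arthritis", "muscle strain", "fibromyalgia", "tendonitis"],
-- 		"endocrine": ["diabetes", "thyroid disorder", "diabetic ketoacidosis", "hypoglycemia"],
-- 		"mental_health": ["depression", "anxiety", "chronic fatigue syndrome"],
-- 		"infectious": ["influenza", "covid-19", "viral infection", "bacterial infection", "strep throat"]
-- 	}
--
-- 	for category, conditions in categories.items():
-- 		if condition in conditions:
-- 			return category
--
-- 	return "general"
-- ===== SOURCE B (Python) =====
-- _CONDITION_TO_CATEGORY = {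
--     "heart attack": "cardiovascular", "stroke": "cardiovascular", "angina": "cardiovascular",
--     "heart failure": "cardiovascular", "syncope": "cardiovascular",
--     "pneumonia": "respiratory", "asthma": "respiratory", "copd": "respiratory",
--     "bronchitis": "respiratory", "respiratory infection": "respiratory",
--     "migraine": "neurological", "tension headache": "neurological", "epilepsy": "neurological",
--     "vertigo": "neurological", "dementia": "neurological",
--     "gastroenteritis": "gastrointestinal", "food poisoning": "gastrointestinal",
--     "appendicitis": "gastrointestinal", "gallstones": "gastrointestinal",
--     "irritable bowel syndrome": "gastrointestinal",
--     "allergic reaction": "dermatological", "eczema": "dermatological",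
--     "psoriasis": "dermatological", "contact dermatitis": "dermatological",
--     "arthritis": "musculoskeletal", "muscle strain": "musculoskeletal",
--     "fibromyalgia": "musculoskeletal", "tendonitis": "musculoskeletal",
--     "diabetes": "endocrine", "thyroid disorder": "endocrine",
--     "diabetic ketoacidosis": "endocrine", "hypoglycemia": "endocrine",
--     "depression": "mental_health", "anxiety": "mental_health",
--     "chronic fatigue syndrome": "mental_health",
--     "influenza": "infectious", "covid-19": "infectious", "viral infection": "infectious",
--     "bacterial infection": "infectious", "strep throat": "infectious",
-- }
--
-- def _get_condition_category(condition: str) -> str: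
--     """Get category for a condition."""
--     return _CONDITION_TO_CATEGORY.get(condition, "general")
-- ===== Notes on version B (the rewrite author's own statement) =====
-- stated objective: simpler
-- what changed: Replaced the loop over a category->conditions table with per-list membership tests by a single inverted condition->category dictionary and one .get with default.
import Mathlib
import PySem

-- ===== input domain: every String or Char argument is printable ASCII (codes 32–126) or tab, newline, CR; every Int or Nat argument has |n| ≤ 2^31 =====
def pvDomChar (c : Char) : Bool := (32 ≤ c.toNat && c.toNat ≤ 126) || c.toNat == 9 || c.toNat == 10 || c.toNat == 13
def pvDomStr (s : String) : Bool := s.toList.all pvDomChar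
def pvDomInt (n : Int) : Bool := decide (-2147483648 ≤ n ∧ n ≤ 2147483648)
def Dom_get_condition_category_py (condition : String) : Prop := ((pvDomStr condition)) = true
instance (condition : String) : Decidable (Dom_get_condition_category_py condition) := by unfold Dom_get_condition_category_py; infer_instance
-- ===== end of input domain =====

-- B replaces A's loop over a category→conditions table (membership test per list)
-- by a single inverted condition→category dictionary looked up once (objective: simpler).

-- ===== PORT A =====
def pvCategories : List (String × List String) :=
  [ ("cardiovascular", ["heart attack", "stroke", "angina", "heart failure", "syncope"]),
    ("respiratory", ["pneumonia", "asthma", "copd", "bronchitis", "respiratory infection"]),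
    ("neurological", ["migraine", "tension headache", "epilepsy", "vertigo", "dementia"]),
    ("gastrointestinal", ["gastroenteritis", "food poisoning", "appendicitis", "gallstones", "irritable bowel syndrome"]),
    ("dermatological", ["allergic reaction", "eczema", "psoriasis", "contact dermatitis"]),
    ("musculoskeletal", ["arthritis", "muscle strain", "fibromyalgia", "tendonitis"]),
    ("endocrine", ["diabetes", "thyroid disorder", "diabetic ketoacidosis", "hypoglycemia"]),
    ("mental_health", ["depression", "anxiety", "chronic fatigue syndrome"]),
    ("infectious", ["influenza", "covid-19", "viral infection", "bacterial infection", "strep throat"]) ]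

-- the 'for category, conditions in categories.items(): if condition in conditions: return category' loop
def pvScanA (condition : String) : List (String × List String) → String
  | [] => "general"
  | (category, conditions) :: rest =>
      if condition ∈ conditions then category else pvScanA condition rest

def get_condition_category_py (condition : String) : String :=
  pvScanA condition pvCategories

-- ===== PORT B =====
def pvConditionToCategory : PySem.Dict String String :=
  PySem.Dict.mk
  [ ("heart attack", "cardiovascular"), ("stroke", "cardiovascular"), ("angina", "cardiovascular"),
    ("heart failure", "cardiovascular"), ("syncope", "cardiovascular"),
    ("pneumonia", "respiratory"), ("asthma", "respiratory"), ("copd", "respiratory"),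
    ("bronchitis", "respiratory"), ("respiratory infection", "respiratory"),
    ("migraine", "neurological"), ("tension headache", "neurological"), ("epilepsy", "neurological"),
    ("vertigo", "neurological"), ("dementia", "neurological"),
    ("gastroenteritis", "gastrointestinal"), ("food poisoning", "gastrointestinal"),
    ("appendicitis", "gastrointestinal"), ("gallstones", "gastrointestinal"),
    ("irritable bowel syndrome", "gastrointestinal"),
    ("allergic reaction", "dermatological"), ("eczema", "dermatological"),
    ("psoriasis", "dermatological"), ("contact dermatitis", "dermatological"),
    ("arthritis", "musculoskeletal"), ("muscle strain", "musculoskeletal"),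
    ("fibromyalgia", "musculoskeletal"), ("tendonitis", "musculoskeletal"),
    ("diabetes", "endocrine"), ("thyroid disorder", "endocrine"),
    ("diabetic ketoacidosis", "endocrine"), ("hypoglycemia", "endocrine"),
    ("depression", "mental_health"), ("anxiety", "mental_health"),
    ("chronic fatigue syndrome", "mental_health"),
    ("influenza", "infectious"), ("covid-19", "infectious"), ("viral infection", "infectious"),
    ("bacterial infection", "infectious"), ("strep throat", "infectious") ]

def get_condition_category_py_alt (condition : String) : String :=
  PySem.Dict.getD pvConditionToCategory condition "general"

-- ===== PRECONDITION & SPEC =====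
def Spec_get_condition_category_py (condition : String) (out : String) : Prop := out = get_condition_category_py_alt condition
instance (condition : String) (out : String) : Decidable (Spec_get_condition_category_py condition out) := by unfold Spec_get_condition_category_py; infer_instance

-- ===== CLAIM (what is proved, stated in full; the proofs are below) =====
def Claim_equal_get_condition_category_py : Prop := ∀ (condition : String), Dom_get_condition_category_py condition → Spec_get_condition_category_py condition (get_condition_category_py condition)

-- ===== LEMMAS AND PROOFS =====

-- inverting one (category, conditions) row: a first-match lookup in the inverted pairs
-- equals the membership test on the row's condition list
theorem pv_lookup_row (c category : String) (conditions : List String) (rest : List (String × String)) :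
    ((PySem.Dict.mk ((conditions.map (fun x => (x, category))) ++ rest)).get? c).getD "general"
      = if c ∈ conditions then category else ((PySem.Dict.mk rest).get? c).getD "general" := by
  induction conditions with
  | nil => simp
  | cons h t ih =>
      simp only [List.map_cons, List.cons_append, PySem.Dict.get?_mk_cons]
      by_cases hc : h = c
      · subst hc; simp
      · have hne : c ≠ h := fun e => hc e.symm
        simp only [beq_iff_eq, hc, if_false, ih, List.mem_cons, hne, false_or]

-- A's scan over the whole table equals the lookup in the flattened inverted table
theorem pv_scan_eq_flat (c : String) (table : List (String × List String)) :
    pvScanA c table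
      = ((PySem.Dict.mk (table.flatMap (fun p => p.2.map (fun x => (x, p.1))))).get? c).getD "general" := by
  induction table with
  | nil => simp [pvScanA, PySem.Dict.get?]
  | cons hd tl ih =>
      obtain ⟨category, conditions⟩ := hd
      simp only [pvScanA, List.flatMap_cons, pv_lookup_row, ih]

-- ===== VERDICT (by name: the statement is the Claim_ definition above) =====
theorem get_condition_category_py_spec : Claim_equal_get_condition_category_py := by
  intro condition _
  unfold Spec_get_condition_category_py get_condition_category_py get_condition_category_py_alt
  rw [pv_scan_eq_flat]
  rfl
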